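-- pv_equiv track=rewrite | github.com/nsms556/programmers | 64064.py | solution
-- ===== SOURCE A (Python) =====
-- from itertools import product
--
-- def match(pattern, string) :
--     if len(pattern) != len(string) :
--         return False
--
--     return all(map(lambda x : x[0] == '*' or x[0] == x[1] , zip(pattern, string)))
--
-- def solution(user_id, banned_id):
--     answer = set()
--
--     matched = []
--     for pattern in banned_id :
--         matched.append([user for user in user_id if match(pattern, user)])
--
--     banned = set(map(tuple, map(sorted, map(set, product(*matched)))))
--
--     for c in banned :
--         if len(c) != len(banned_id) :
--             continue
--
--         answer.add(c)
--
--     return len(answer)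
-- ===== SOURCE B (Python) =====
-- def match(pattern, string):
--     if len(pattern) != len(string):
--         return False
--     return all(p == '*' or p == c for p, c in zip(pattern, string))
--
-- def solution(user_id, banned_id):
--     matched = [[u for u in user_id if match(p, u)] for p in banned_id]
--
--     def dfs(ms, chosen):
--         if not ms:
--             return [tuple(sorted(chosen))]
--         return [t for u in ms[0] if u not in chosen
--                   for t in dfs(ms[1:], chosen + [u])]
--
--     return len(set(dfs(matched, [])))
-- ===== Notes on version B (the rewrite author's own statement) =====
-- stated objective: alternative
-- what changed: A materializes the full cartesian product of the per-pattern match lists and only afterwards canonicalizes each tuple and filters out those with repeated users; B does recursive backtracking over the patterns with a running 'chosen' list, pruning any already-chosen user immediately and deduplicating the sorted results.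
import Mathlib
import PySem

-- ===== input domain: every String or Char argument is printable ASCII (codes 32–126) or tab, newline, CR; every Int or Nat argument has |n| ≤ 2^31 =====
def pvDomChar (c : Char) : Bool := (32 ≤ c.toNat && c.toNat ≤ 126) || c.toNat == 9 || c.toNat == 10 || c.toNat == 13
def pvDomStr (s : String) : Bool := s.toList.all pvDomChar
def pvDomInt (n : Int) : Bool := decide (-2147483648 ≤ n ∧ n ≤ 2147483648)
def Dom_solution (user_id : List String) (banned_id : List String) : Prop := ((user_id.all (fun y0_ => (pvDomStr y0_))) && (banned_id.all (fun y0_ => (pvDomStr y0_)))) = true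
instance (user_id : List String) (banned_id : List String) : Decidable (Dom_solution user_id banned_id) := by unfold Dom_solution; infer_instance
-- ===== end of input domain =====

-- B replaces A's full cartesian product + after-the-fact canonicalisation/size filter by recursive
-- backtracking that prunes already-chosen users immediately (objective: alternative; same worst case).

-- ===== PORT A =====
-- shared helper: the Python 'match(pattern, string)' (identical in Source A and Source B)
def pvMatch (pattern string : String) : Bool :=
  let p := pattern.toList
  let s := string.toList
  if p.length ≠ s.length then false
  else (p.zip s).all (fun x => x.1 == '*' || x.1 == x.2)

-- itertools.product(*matched), ported by hand (exact: first list varies slowest, as CPython docs state)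
def pvProduct : List (List String) → List (List String)
  | [] => [[]]
  | m :: ms => m.flatMap (fun u => (pvProduct ms).map (fun t => u :: t))

def solution (user_id : List String) (banned_id : List String) : Int :=
  let matched : List (List String) :=
    banned_id.foldl (fun acc pattern => acc ++ [user_id.filter (fun user => pvMatch pattern user)]) []
  let banned : PySem.Set (List String) :=
    PySem.Set.ofList ((pvProduct matched).map
      (fun t => PySem.List.sorted (PySem.Set.ofList t) (fun x => x) false))
  let answer : PySem.Set (List String) :=
    banned.foldl (fun acc c =>
      if PySem.List.len c ≠ PySem.List.len banned_id then acc else PySem.Set.add acc c)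
      PySem.Set.empty
  PySem.List.len answer

-- ===== PORT B =====
def pvDfs : List (List String) → List String → List (List String)
  | [], chosen => [PySem.List.sorted chosen (fun x => x) false]
  | m :: ms, chosen => m.flatMap (fun u => if u ∈ chosen then [] else pvDfs ms (chosen ++ [u]))

def solution_alt (user_id : List String) (banned_id : List String) : Int :=
  let matched : List (List String) :=
    banned_id.map (fun p => user_id.filter (fun u => pvMatch p u))
  PySem.List.len (PySem.Set.ofList (pvDfs matched []))

-- ===== PRECONDITION & SPEC =====
def Spec_solution (user_id : List String) (banned_id : List String) (out : Int) : Prop := out = solution_alt user_id banned_id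
instance (user_id : List String) (banned_id : List String) (out : Int) : Decidable (Spec_solution user_id banned_id out) := by unfold Spec_solution; infer_instance

-- ===== CLAIM (what is proved, stated in full; the proofs are below) =====
def Claim_equal_solution : Prop := ∀ (user_id : List String) (banned_id : List String), Dom_solution user_id banned_id → Spec_solution user_id banned_id (solution user_id banned_id)

-- ===== LEMMAS AND PROOFS =====

-- every tuple of product(*ms) has one entry per list
lemma length_mem_pvProduct {ms : List (List String)} {s : List String}
    (h : s ∈ pvProduct ms) : s.length = ms.length := by
  induction ms generalizing s with
  | nil => simp [pvProduct] at h; simp [h]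
  | cons m ms ih =>
    simp only [pvProduct, List.mem_flatMap, List.mem_map] at h
    obtain ⟨u, -, t, ht, rfl⟩ := h
    simp [ih ht]

-- set(xs) (first-occurrence dedup) is a sublist of xs
lemma ofList_sublist (xs : List String) : (PySem.Set.ofList xs).Sublist xs := by
  induction xs using List.reverseRecOn with
  | nil => simp [PySem.Set.ofList_nil]
  | append_singleton xs x ih =>
    rw [PySem.Set.ofList_append_singleton, PySem.Set.add_eq_ite]
    split
    · exact ih.trans (List.sublist_append_left _ _)
    · exact ih.append_right _

lemma nodup_append_singleton {l : List String} {u : String}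
    (h : l.Nodup) (hu : u ∉ l) : (l ++ [u]).Nodup := by
  rw [List.nodup_append]
  refine ⟨h, List.nodup_singleton u, fun a ha b hb => ?_⟩
  rw [List.mem_singleton] at hb
  subst hb
  exact fun h' => hu (h' ▸ ha)

-- the backtracking results are exactly the sorted duplicate-free product tuples extending `chosen`
lemma mem_pvDfs (ms : List (List String)) (chosen : List String) (t : List String)
    (hch : chosen.Nodup) :
    t ∈ pvDfs ms chosen ↔
      ∃ s, s ∈ pvProduct ms ∧ (chosen ++ s).Nodup ∧
        t = PySem.List.sorted (chosen ++ s) (fun x => x) false := by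
  induction ms generalizing chosen with
  | nil => simp [pvDfs, pvProduct, hch]
  | cons m ms ih =>
    simp only [pvDfs, List.mem_flatMap]
    constructor
    · rintro ⟨u, hu, ht⟩
      by_cases hmem : u ∈ chosen
      · simp [hmem] at ht
      · rw [if_neg hmem] at ht
        have hch' : (chosen ++ [u]).Nodup := nodup_append_singleton hch hmem
        obtain ⟨s', hs', hnd, rfl⟩ := (ih (chosen ++ [u]) hch').mp ht
        refine ⟨u :: s', ?_, ?_, ?_⟩
        · simp only [pvProduct, List.mem_flatMap, List.mem_map]
          exact ⟨u, hu, s', hs', rfl⟩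
        · simpa [List.append_assoc] using hnd
        · simp [List.append_assoc]
    · rintro ⟨s, hs, hnd, rfl⟩
      simp only [pvProduct, List.mem_flatMap, List.mem_map] at hs
      obtain ⟨u, hu, s', hs', rfl⟩ := hs
      have hnd' : (chosen ++ [u] ++ s').Nodup := by
        simpa [List.append_assoc] using hnd
      have h1 : (chosen ++ [u]).Nodup := hnd'.sublist (List.sublist_append_left _ _)
      have hmem : u ∉ chosen := fun hc =>
        (List.nodup_append.mp h1).2.2 u hc u (List.mem_singleton.mpr rfl) rfl
      refine ⟨u, hu, ?_⟩
      rw [if_neg hmem]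
      refine (ih (chosen ++ [u]) h1).mpr
        ⟨s', hs', hnd', by simp [List.append_assoc]⟩

lemma conditional_add_foldl (l : List (List String)) (p : List String → Prop) [DecidablePred p]
    (s : PySem.Set (List String)) :
    l.foldl (fun acc c => if ¬ p c then acc else PySem.Set.add acc c) s
      = (l.filter (fun c => decide (p c))).foldl PySem.Set.add s := by
  induction l generalizing s with
  | nil => rfl
  | cons c l ih =>
    by_cases h : p c <;>
      simp only [List.foldl_cons, List.filter_cons, h, decide_true, decide_false,
        not_true_eq_false, not_false_eq_true, if_true, if_false] <;>
      exact ih _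

-- A's deduplicated+filtered canonical tuples are a permutation of B's deduplicated backtracking results
lemma perm_key (M : List (List String)) (n : Nat) (hn : M.length = n) :
    (PySem.Set.ofList
        ((PySem.Set.ofList ((pvProduct M).map
            (fun t => PySem.List.sorted (PySem.Set.ofList t) (fun x => x) false))).filter
          (fun c => decide (c.length = n)))).Perm
      (PySem.Set.ofList (pvDfs M [])) := by
  rw [List.perm_ext_iff_of_nodup (PySem.Set.nodup_ofList _) (PySem.Set.nodup_ofList _)]
  intro t
  simp only [PySem.Set.mem_ofList, List.mem_filter, List.mem_map, decide_eq_true_eq]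
  have hdfs := mem_pvDfs M [] t List.nodup_nil
  simp only [List.nil_append] at hdfs
  rw [hdfs]
  constructor
  · rintro ⟨⟨s, hsP, rfl⟩, hlen⟩
    have hlenS : s.length = n := by rw [length_mem_pvProduct hsP, hn]
    have hofl : PySem.Set.ofList s = s := by
      apply (ofList_sublist s).eq_of_length
      have := PySem.List.length_sorted (PySem.Set.ofList s) (fun x : String => x) false
      omega
    have hnd : s.Nodup := by rw [← hofl]; exact PySem.Set.nodup_ofList s
    exact ⟨s, hsP, hnd,
      congrArg (fun l => PySem.List.sorted l (fun x => x) false) hofl⟩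
  · rintro ⟨s, hsP, hnd, rfl⟩
    have hlenS : s.length = n := by rw [length_mem_pvProduct hsP, hn]
    refine ⟨⟨s, hsP, congrArg (fun l => PySem.List.sorted l (fun x => x) false)
      (PySem.Set.ofList_eq_self_of_nodup s hnd)⟩, ?_⟩
    rw [PySem.List.length_sorted]
    exact hlenS

lemma main_eq (user_id banned_id : List String) :
    solution user_id banned_id = solution_alt user_id banned_id := by
  unfold solution solution_alt
  rw [PySem.List.foldl_append_singleton_eq_map, List.nil_append]
  simp only [ne_eq]
  rw [conditional_add_foldl _ (fun c => PySem.List.len c = PySem.List.len banned_id)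
    PySem.Set.empty]
  rw [show (PySem.Set.empty : PySem.Set (List String)) = ([] : List (List String)) from rfl,
    ← PySem.Set.ofList_eq_foldl]
  simp only [PySem.List.len_eq, Nat.cast_inj]
  exact_mod_cast (perm_key _ banned_id.length (by rw [List.length_map])).length_eq

-- ===== VERDICT (by name: the statement is the Claim_ definition above) =====
theorem solution_spec : Claim_equal_solution := by
  intro user_id banned_id _
  exact main_eq user_id banned_id
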